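-- pv_equiv track=rewrite | github.com/allenai/tracie | code/extractions/extractor_distance.py | get_temporal_words
-- ===== SOURCE A (Python) =====
-- def get_temporal_words(words, tags):
--     ret = []
--     for i, t in enumerate(tags):
--         if t == "B-ARGM-TMP":
--             end = i + 1
--             for j in range(i+1, len(tags)):
--                 if tags[j] == "I-ARGM-TMP":
--                     end = j + 1
--                 else:
--                     break
--             cur = []
--             for k in range(i, end):
--                 cur.append(words[k].lower())
--             ret.append(cur)
--     return ret
-- ===== SOURCE B (Python) =====
-- def get_temporal_words(words, tags):
--     ret = []
--     cur = None
--     for i, t in enumerate(tags):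
--         if t == "B-ARGM-TMP":
--             if cur is not None:
--                 ret.append(cur)
--             cur = [words[i].lower()]
--         elif t == "I-ARGM-TMP":
--             if cur is not None:
--                 cur.append(words[i].lower())
--         else:
--             if cur is not None:
--                 ret.append(cur)
--                 cur = None
--     if cur is not None:
--         ret.append(cur)
--     return ret
-- ===== Notes on version B (the rewrite author's own statement) =====
-- stated objective: simpler
-- what changed: Replaced A's scan-ahead (inner loop finding the span end plus a range loop rebuilding it) by a single linear pass that carries a running current span, flushed on span boundaries and at the end.
import Mathlib
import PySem

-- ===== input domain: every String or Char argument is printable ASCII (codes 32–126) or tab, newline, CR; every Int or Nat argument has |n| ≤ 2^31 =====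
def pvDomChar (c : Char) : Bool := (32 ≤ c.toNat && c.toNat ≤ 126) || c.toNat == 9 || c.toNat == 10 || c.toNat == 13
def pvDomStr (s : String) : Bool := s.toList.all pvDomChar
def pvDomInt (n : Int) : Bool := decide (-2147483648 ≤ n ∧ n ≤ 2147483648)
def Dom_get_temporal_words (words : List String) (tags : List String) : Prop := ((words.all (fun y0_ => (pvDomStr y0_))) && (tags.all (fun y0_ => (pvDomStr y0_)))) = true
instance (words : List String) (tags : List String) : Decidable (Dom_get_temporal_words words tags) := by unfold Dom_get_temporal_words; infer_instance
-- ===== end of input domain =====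

-- B replaces A's scan-ahead span extraction (inner loop finding the span end, then a
-- range loop rebuilding the span) by one linear pass carrying a running current span;
-- objective: simpler.

-- ===== PORT A =====
-- inner loop 'for j in range(i+1, len(tags)): if tags[j] == "I-ARGM-TMP": end = j+1 else: break'
def pvScanEnd (tags : List String) : List Int → Int → Int
  | [], e => e
  | j :: rest, e =>
      if PySem.List.pyGetD tags j "" == "I-ARGM-TMP" then pvScanEnd tags rest (j + 1) else e

def get_temporal_words (words : List String) (tags : List String) : List (List String) :=
  (PySem.List.enumerate tags 0).foldl
    (fun ret p =>
      let i := p.1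
      let t := p.2
      if t == "B-ARGM-TMP" then
        let e := pvScanEnd tags (PySem.List.pyRange (i + 1) (PySem.List.len tags) 1) (i + 1)
        let cur := (PySem.List.pyRange i e 1).foldl
          (fun c k => c ++ [PySem.Str.lower (PySem.List.pyGetD words k "")]) []
        ret ++ [cur]
      else ret) []

-- ===== PORT B =====
def get_temporal_words_alt (words : List String) (tags : List String) : List (List String) :=
  let st := (PySem.List.enumerate tags 0).foldl
    (fun (s : List (List String) × Option (List String)) p =>
      let i := p.1
      let t := p.2
      if t == "B-ARGM-TMP" then
        ((match s.2 with | some c => s.1 ++ [c] | none => s.1),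
         some [PySem.Str.lower (PySem.List.pyGetD words i "")])
      else if t == "I-ARGM-TMP" then
        (s.1, match s.2 with
              | some c => some (c ++ [PySem.Str.lower (PySem.List.pyGetD words i "")])
              | none => none)
      else
        ((match s.2 with | some c => s.1 ++ [c] | none => s.1), none))
    ([], none)
  match st.2 with
  | some c => st.1 ++ [c]
  | none => st.1

-- ===== PRECONDITION & SPEC =====
-- index i lies inside a temporal span: some s ≤ i is tagged B-ARGM-TMP and every tag strictly
-- between s and i (inclusive of i, when s < i) is I-ARGM-TMP — exactly the indices k for which
-- Python A evaluates words[k].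
def pvInSpan (tags : List String) (i : Nat) : Prop :=
  ∃ s ∈ List.range (i + 1), tags.getD s "" = "B-ARGM-TMP" ∧
    ∀ j ∈ List.range (i + 1), s < j → tags.getD j "" = "I-ARGM-TMP"

-- Pre_ excludes exactly the inputs on which Python A raises IndexError: a temporal span
-- reaching an index ≥ len(words).
def Pre_get_temporal_words (words : List String) (tags : List String) : Prop :=
  ∀ i ∈ List.range tags.length, words.length ≤ i → ¬ pvInSpan tags i

instance (words : List String) (tags : List String) : Decidable (Pre_get_temporal_words words tags) := by
  unfold Pre_get_temporal_words pvInSpan; infer_instance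

def pvWitness_get_temporal_words : List String × List String :=
  (["On", "Monday", "we", "ran"], ["O", "B-ARGM-TMP", "I-ARGM-TMP", "O"])

def Spec_get_temporal_words (words : List String) (tags : List String) (out : List (List String)) : Prop := out = get_temporal_words_alt words tags
instance (words : List String) (tags : List String) (out : List (List String)) : Decidable (Spec_get_temporal_words words tags out) := by unfold Spec_get_temporal_words; infer_instance

-- ===== CLAIM (what is proved, stated in full; the proofs are below) =====
def Claim_equal_get_temporal_words : Prop := ∀ (words : List String) (tags : List String), Dom_get_temporal_words words tags → Pre_get_temporal_words words tags → Spec_get_temporal_words words tags (get_temporal_words words tags)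

-- ===== LEMMAS AND PROOFS =====

-- length of the leading run of I-ARGM-TMP tags
def pvRunI : List String → Nat
  | [] => 0
  | t :: r => if t = "I-ARGM-TMP" then pvRunI r + 1 else 0

-- the lowered words of the leading I-run, starting at word index n
def pvLowRun (words : List String) : Nat → List String → List String
  | _, [] => []
  | n, t :: r =>
      if t = "I-ARGM-TMP" then
        PySem.Str.lower (PySem.List.pyGetD words (n : Int) "") :: pvLowRun words (n + 1) r
      else []

lemma pvScanEnd_eq (tags : List String) :
    ∀ d n, tags.length - n = d → n ≤ tags.length →
      pvScanEnd tags (PySem.List.pyRange (n : Int) (PySem.List.len tags) 1) (n : Int)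
        = (n : Int) + (pvRunI (tags.drop n) : Int) := by
  intro d
  induction d with
  | zero =>
      intro n hd hn
      have hn' : n = tags.length := by omega
      subst hn'
      rw [PySem.List.len_eq, PySem.List.pyRange_one_eq_nil (by omega)]
      simp [pvScanEnd, pvRunI]
  | succ d ih =>
      intro n hd hn
      have hlt : n < tags.length := by omega
      rw [PySem.List.len_eq, PySem.List.pyRange_one_cons (by exact_mod_cast hlt)]
      have hdrop : tags.drop n = tags[n] :: tags.drop (n + 1) :=
        List.drop_eq_getElem_cons hlt
      have hget : PySem.List.pyGetD tags (n : Int) "" = tags[n] := by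
        rw [PySem.List.pyGetD_natCast, List.getD_eq_getElem?_getD, List.getElem?_eq_getElem hlt]
        rfl
      simp only [pvScanEnd, hget]
      by_cases hI : tags[n] = "I-ARGM-TMP"
      · have hIb : (tags[n] == "I-ARGM-TMP") = true := by simp [hI]
        rw [hIb]
        simp only [if_true]
        rw [show (n : Int) + 1 = ((n + 1 : Nat) : Int) by push_cast; ring]
        have := ih (n + 1) (by omega) (by omega)
        rw [PySem.List.len_eq] at this
        rw [this, hdrop]
        simp [pvRunI, hI]
        ring
      · have hIb : (tags[n] == "I-ARGM-TMP") = false := by simp [hI]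
        rw [hIb]
        simp only [hdrop]
        simp [pvRunI, hI]

lemma pvMapRun (words : List String) :
    ∀ (suffix : List String) (m : Nat),
      (PySem.List.pyRange (m : Int) ((m : Int) + (pvRunI suffix : Int)) 1).map
        (fun j => PySem.Str.lower (PySem.List.pyGetD words j "")) = pvLowRun words m suffix := by
  intro suffix
  induction suffix with
  | nil =>
      intro m
      rw [show (m : Int) + ((pvRunI [] : Nat) : Int) = (m : Int) by simp [pvRunI]]
      rw [PySem.List.pyRange_one_eq_nil (by omega)]
      simp [pvLowRun]
  | cons t r ih =>
      intro m
      by_cases hI : t = "I-ARGM-TMP"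
      · have hrun : pvRunI (t :: r) = pvRunI r + 1 := by simp [pvRunI, hI]
        rw [hrun]
        have hlt : (m : Int) < (m : Int) + ((pvRunI r + 1 : Nat) : Int) := by push_cast; omega
        rw [PySem.List.pyRange_one_cons hlt]
        simp only [List.map_cons]
        have hcast : (m : Int) + 1 = ((m + 1 : Nat) : Int) := by push_cast; ring
        have hend : (m : Int) + ((pvRunI r + 1 : Nat) : Int)
            = ((m + 1 : Nat) : Int) + ((pvRunI r : Nat) : Int) := by push_cast; ring
        rw [hcast, hend, ih (m + 1)]
        simp [pvLowRun, hI]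
      · have hrun : pvRunI (t :: r) = 0 := by simp [pvRunI, hI]
        rw [hrun]
        rw [show (m : Int) + ((0 : Nat) : Int) = (m : Int) by simp]
        rw [PySem.List.pyRange_one_eq_nil (by omega)]
        simp [pvLowRun, hI]

-- the pending span A has already emitted while B's current span is still open
def pvPend (words : List String) (n : Nat) (ts : List String) : Option (List String) → List (List String)
  | none => []
  | some c => [c ++ pvLowRun words n ts]

-- A's fold step / B's fold step, named for the invariant lemma
def pvAStep (words tags : List String) (ret : List (List String)) (p : Int × String) : List (List String) :=
  if p.2 == "B-ARGM-TMP" then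
    let e := pvScanEnd tags (PySem.List.pyRange (p.1 + 1) (PySem.List.len tags) 1) (p.1 + 1)
    let cur := (PySem.List.pyRange p.1 e 1).foldl
      (fun c k => c ++ [PySem.Str.lower (PySem.List.pyGetD words k "")]) []
    ret ++ [cur]
  else ret

def pvBStep (words : List String) (s : List (List String) × Option (List String)) (p : Int × String) :
    List (List String) × Option (List String) :=
  if p.2 == "B-ARGM-TMP" then
    ((match s.2 with | some c => s.1 ++ [c] | none => s.1),
     some [PySem.Str.lower (PySem.List.pyGetD words p.1 "")])
  else if p.2 == "I-ARGM-TMP" then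
    (s.1, match s.2 with
          | some c => some (c ++ [PySem.Str.lower (PySem.List.pyGetD words p.1 "")])
          | none => none)
  else
    ((match s.2 with | some c => s.1 ++ [c] | none => s.1), none)

def pvFinish (s : List (List String) × Option (List String)) : List (List String) :=
  match s.2 with
  | some c => s.1 ++ [c]
  | none => s.1

lemma pvMain (words tags : List String) :
    ∀ (ts : List String) (n : Nat) (ret : List (List String)) (cur : Option (List String)),
      ts = tags.drop n →
      (PySem.List.enumerate ts (n : Int)).foldl (pvAStep words tags) (ret ++ pvPend words n ts cur)
        = pvFinish ((PySem.List.enumerate ts (n : Int)).foldl (pvBStep words) (ret, cur)) := by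
  intro ts
  induction ts with
  | nil =>
      intro n ret cur _
      cases cur with
      | none => simp [PySem.List.enumerate_nil, pvPend, pvFinish]
      | some c => simp [PySem.List.enumerate_nil, pvPend, pvFinish, pvLowRun]
  | cons t r ih =>
      intro n ret cur hts
      have hlt : n < tags.length := by
        by_contra h
        rw [List.drop_eq_nil_of_le (by omega)] at hts
        simp at hts
      have hcons := List.drop_eq_getElem_cons hlt
      rw [← hts] at hcons
      have hget : tags[n] = t := ((List.cons.injEq _ _ _ _ ▸ hcons).1).symm
      have hdropn : tags.drop (n + 1) = r := ((List.cons.injEq _ _ _ _ ▸ hcons).2).symm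
      rw [PySem.List.enumerate_cons]
      have hcast : (n : Int) + 1 = ((n + 1 : Nat) : Int) := by push_cast; ring
      simp only [List.foldl_cons, hcast]
      by_cases hB : t = "B-ARGM-TMP"
      · -- A flushes pending (lowRun of a B-headed list is []) and emits the full span;
        -- B flushes pending and opens a new current span.
        have hse : pvScanEnd tags (PySem.List.pyRange ((n : Int) + 1) (PySem.List.len tags) 1) ((n : Int) + 1)
            = ((n + 1 : Nat) : Int) + (pvRunI (tags.drop (n + 1)) : Int) := by
          rw [hcast]
          exact pvScanEnd_eq tags (tags.length - (n + 1)) (n + 1) rfl (by omega)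
        have hAstep : ∀ acc, pvAStep words tags acc ((n : Int), t)
            = acc ++ [[PySem.Str.lower (PySem.List.pyGetD words (n : Int) "")] ++ pvLowRun words (n + 1) r] := by
          intro acc
          simp only [pvAStep, hB, beq_self_eq_true, if_true]
          rw [hse, PySem.List.foldl_append_singleton_eq_map, hdropn]
          have hr : PySem.List.pyRange (n : Int) (((n + 1 : Nat) : Int) + (pvRunI r : Int)) 1
              = (n : Int) :: PySem.List.pyRange ((n + 1 : Nat) : Int) (((n + 1 : Nat) : Int) + (pvRunI r : Int)) 1 := by
            rw [PySem.List.pyRange_one_cons (by push_cast; omega), hcast]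
          rw [hr]
          simp only [List.map_cons]
          rw [pvMapRun words r (n + 1)]
          simp
        cases cur with
        | none =>
            rw [show ret ++ pvPend words n (t :: r) none = ret by simp [pvPend]]
            rw [hAstep ret]
            rw [show pvBStep words (ret, none) ((n : Int), t)
                = (ret, some [PySem.Str.lower (PySem.List.pyGetD words (n : Int) "")]) by
              simp [pvBStep, hB]]
            have := ih (n + 1) ret (some [PySem.Str.lower (PySem.List.pyGetD words (n : Int) "")]) hdropn.symm
            rw [← this]
            simp [pvPend]
        | some c =>
            rw [show ret ++ pvPend words n (t :: r) (some c) = (ret ++ [c]) by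
              simp [pvPend, pvLowRun, hB]]
            rw [hAstep (ret ++ [c])]
            rw [show pvBStep words (ret, some c) ((n : Int), t)
                = (ret ++ [c], some [PySem.Str.lower (PySem.List.pyGetD words (n : Int) "")]) by
              simp [pvBStep, hB]]
            have := ih (n + 1) (ret ++ [c]) (some [PySem.Str.lower (PySem.List.pyGetD words (n : Int) "")]) hdropn.symm
            rw [← this]
            simp [pvPend]
      · have hAstep : pvAStep words tags (ret ++ pvPend words n (t :: r) cur) ((n : Int), t)
            = ret ++ pvPend words n (t :: r) cur := by simp [pvAStep, hB]
        rw [hAstep]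
        by_cases hI : t = "I-ARGM-TMP"
        · -- A does nothing; the pending span absorbs this word; B extends its current span.
          cases cur with
          | none =>
              rw [show pvBStep words (ret, none) ((n : Int), t) = (ret, none) by
                simp [pvBStep, hI]]
              rw [show ret ++ pvPend words n (t :: r) none = ret ++ pvPend words (n + 1) r none by
                simp [pvPend]]
              exact ih (n + 1) ret none hdropn.symm
          | some c =>
              rw [show pvBStep words (ret, some c) ((n : Int), t)
                  = (ret, some (c ++ [PySem.Str.lower (PySem.List.pyGetD words (n : Int) "")])) by
                simp [pvBStep, hI]]
              rw [show ret ++ pvPend words n (t :: r) (some c)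
                  = ret ++ pvPend words (n + 1) r
                      (some (c ++ [PySem.Str.lower (PySem.List.pyGetD words (n : Int) "")])) by
                simp [pvPend, pvLowRun, hI]]
              exact ih (n + 1) ret _ hdropn.symm
        · -- other tag: A does nothing (pending already flushed); B flushes and closes.
          cases cur with
          | none =>
              rw [show pvBStep words (ret, none) ((n : Int), t) = (ret, none) by
                simp [pvBStep, hB, hI]]
              rw [show ret ++ pvPend words n (t :: r) none = ret ++ pvPend words (n + 1) r none by
                simp [pvPend]]
              exact ih (n + 1) ret none hdropn.symm
          | some c =>
              rw [show pvBStep words (ret, some c) ((n : Int), t) = (ret ++ [c], none) by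
                simp [pvBStep, hB, hI]]
              rw [show ret ++ pvPend words n (t :: r) (some c)
                  = (ret ++ [c]) ++ pvPend words (n + 1) r none by
                simp [pvPend, pvLowRun, hI]]
              exact ih (n + 1) (ret ++ [c]) none hdropn.symm

-- ===== VERDICT (by name: the statement is the Claim_ definition above) =====
theorem get_temporal_words_spec : Claim_equal_get_temporal_words := by
  intro words tags _ _
  unfold Spec_get_temporal_words get_temporal_words get_temporal_words_alt
  have h := pvMain words tags tags 0 [] none (by simp)
  simp only [Nat.cast_zero, pvPend, List.append_nil] at h
  exact h
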